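-- pv_equiv track=rewrite | github.com/emilioanh/python_study | CheckTicTacToe.py | diagonal_match
-- ===== SOURCE A (Python) =====
-- def diagonal_match(game, size):
--     if game[0][0] != 0 :
--         match_count = 0
--         for i in range(size-1):
--             if game[i][i]==game[i+1][i+1]:
--                 match_count += 1
--         if match_count==size-1:
--             return game[0][0]
--     if game[0][size - 1] != 0:
--         match_count = 0
--         for i in range(size-1):
--             if game[i][size-1-i]==game[i+1][size-2-i]:
--                 match_count += 1
--         if match_count==size-1:
--             return game[0][size - 1]
--     return 0
-- ===== SOURCE B (Python) =====
-- def diagonal_match(game, size):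
--     diag = {game[i][i] for i in range(size)}
--     if len(diag) == 1:
--         v = diag.pop()
--         if v != 0:
--             return v
--     anti = {game[i][size - 1 - i] for i in range(size)}
--     if len(anti) == 1:
--         v = anti.pop()
--         if v != 0:
--             return v
--     return 0
-- ===== Notes on version B (the rewrite author's own statement) =====
-- stated objective: simpler
-- what changed: Replaces A's adjacent-pair match counter (count of game[i][i]==game[i+1][i+1] over range(size-1), tested against size-1) with a set-cardinality test: each diagonal is collected into a set and the player wins iff that set is a nonzero singleton.
-- outside the precondition, e.g. on diagonal_match([[0, 0], [0]], 2): A returns 0, B raises IndexError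
import Mathlib
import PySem

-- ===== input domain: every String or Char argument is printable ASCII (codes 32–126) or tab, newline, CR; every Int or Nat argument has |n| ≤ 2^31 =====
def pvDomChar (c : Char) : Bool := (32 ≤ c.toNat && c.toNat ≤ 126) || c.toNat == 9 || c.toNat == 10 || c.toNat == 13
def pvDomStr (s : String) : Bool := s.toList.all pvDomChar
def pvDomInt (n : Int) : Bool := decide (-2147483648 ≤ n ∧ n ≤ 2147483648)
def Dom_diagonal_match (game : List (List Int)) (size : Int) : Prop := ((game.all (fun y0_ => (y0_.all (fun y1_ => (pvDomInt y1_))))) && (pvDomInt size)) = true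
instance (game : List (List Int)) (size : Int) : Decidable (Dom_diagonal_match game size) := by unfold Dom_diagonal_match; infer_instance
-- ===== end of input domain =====

-- B replaces A's adjacent-pair match counter with a set-cardinality test: each diagonal is
-- collected into a set, and the player wins iff that set is a nonzero singleton (simpler
-- decomposition; same O(size) cost).

-- game[i][j] with Python indexing (in range wherever the Python reads a cell under Pre_)
def pvCell (game : List (List Int)) (i j : Int) : Int :=
  PySem.List.pyGetD (PySem.List.pyGetD game i []) j 0

-- ===== PORT A =====
def diagonal_match (game : List (List Int)) (size : Int) : Int :=
  if pvCell game 0 0 ≠ 0 ∧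
      (PySem.List.pyRange 0 (size - 1) 1).foldl
        (fun mc i => if pvCell game i i = pvCell game (i + 1) (i + 1) then mc + 1 else mc)
        (0 : Int) = size - 1 then
    pvCell game 0 0
  else if pvCell game 0 (size - 1) ≠ 0 ∧
      (PySem.List.pyRange 0 (size - 1) 1).foldl
        (fun mc i => if pvCell game i (size - 1 - i) = pvCell game (i + 1) (size - 2 - i) then mc + 1 else mc)
        (0 : Int) = size - 1 then
    pvCell game 0 (size - 1)
  else 0

-- ===== PORT B =====
-- diag.pop() is taken on a singleton set only, so it is its sole element (order-independent)
def diagonal_match_alt (game : List (List Int)) (size : Int) : Int :=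
  let diag : PySem.Set Int :=
    PySem.Set.ofList ((PySem.List.pyRange 0 size 1).map (fun i => pvCell game i i))
  if diag.length = 1 ∧ diag.headD 0 ≠ 0 then diag.headD 0
  else
    let anti : PySem.Set Int :=
      PySem.Set.ofList ((PySem.List.pyRange 0 size 1).map (fun i => pvCell game i (size - 1 - i)))
    if anti.length = 1 ∧ anti.headD 0 ≠ 0 then anti.headD 0
    else 0

-- ===== PRECONDITION & SPEC =====
-- Pre_ admits the inputs on which every cell A may read is in range: size ≥ 1 boards whose
-- first size rows each hold at least size entries, and degenerate size ≤ 0 calls whose first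
-- row reaches the wrapped-around column size-1. Excluded inputs on which A still returns are
-- ragged boards that A leaves unread only because a 0 corner short-circuits its loops (B reads
-- the whole diagonal there and raises).
def Pre_diagonal_match (game : List (List Int)) (size : Int) : Prop :=
  (1 ≤ size ∧ size ≤ (game.length : Int) ∧ ∀ row ∈ game.take size.toNat, size ≤ (row.length : Int))
  ∨ (size ≤ 0 ∧ game ≠ [] ∧ 1 - size ≤ ((game.headD []).length : Int))
instance (game : List (List Int)) (size : Int) : Decidable (Pre_diagonal_match game size) := by
  unfold Pre_diagonal_match; infer_instance
def pvWitness_diagonal_match : List (List Int) × Int := ([[1, 0], [0, 1]], 2)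

def Spec_diagonal_match (game : List (List Int)) (size : Int) (out : Int) : Prop := out = diagonal_match_alt game size
instance (game : List (List Int)) (size : Int) (out : Int) : Decidable (Spec_diagonal_match game size out) := by unfold Spec_diagonal_match; infer_instance

-- ===== CLAIM (what is proved, stated in full; the proofs are below) =====
def Claim_equal_diagonal_match : Prop := ∀ (game : List (List Int)) (size : Int), Dom_diagonal_match game size → Pre_diagonal_match game size → Spec_diagonal_match game size (diagonal_match game size)

-- ===== LEMMAS AND PROOFS =====

-- a chain of adjacent equalities over 0..n is the same as uniformity against the anchor f 0
lemma pvChain_iff (f : Int → Int) (n : Nat) :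
    (∀ i : Int, 0 ≤ i → i < (n : Int) → f i = f (i + 1)) ↔
      (∀ i : Int, 0 ≤ i → i < (n : Int) + 1 → f i = f 0) := by
  induction n with
  | zero =>
    constructor
    · intro _ i h0 h1
      have : i = 0 := by omega
      simp [this]
    · intro _ i h0 h1; omega
  | succ m ih =>
    constructor
    · intro h i h0 h1
      by_cases hi : i < (m : Int) + 1
      · exact (ih.mp (fun j hj0 hj1 => h j hj0 (by omega))) i h0 hi
      · have hi' : i = (m : Int) + 1 := by push_cast at h1 ⊢; omega
        have h2 : f (m : Int) = f ((m : Int) + 1) := h m (by positivity) (by push_cast; omega)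
        have h3 : f (m : Int) = f 0 :=
          (ih.mp (fun j hj0 hj1 => h j hj0 (by omega))) m (by positivity) (by omega)
        rw [hi', ← h2, h3]
    · intro h i h0 h1
      have e1 : f i = f 0 := h i h0 (by push_cast at h1 ⊢; omega)
      have e2 : f (i + 1) = f 0 := h (i + 1) (by omega) (by push_cast at h1 ⊢; omega)
      rw [e1, e2]

-- A's "match_count == size-1" test says every cell of the diagonal equals its anchor f 0
lemma pvBranch_iff (f : Int → Int) (size : Int) (h : 1 ≤ size) :
    ((PySem.List.pyRange 0 (size - 1) 1).foldl
        (fun mc i => if f i = f (i + 1) then mc + 1 else mc) (0 : Int) = size - 1) ↔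
      (∀ i ∈ PySem.List.pyRange 0 size 1, f i = f 0) := by
  have hfc := PySem.List.foldl_count_if (fun i => decide (f i = f (i + 1)))
      (PySem.List.pyRange 0 (size - 1) 1) 0
  simp only [decide_eq_true_eq] at hfc
  rw [hfc]
  have hlen : ((PySem.List.pyRange 0 (size - 1) 1).length : Int) = size - 1 := by
    rw [PySem.List.length_pyRange_one]; omega
  constructor
  · intro hc i hi
    have hmem := PySem.List.mem_pyRange_one.mp hi
    have hcount : List.countP (fun i => decide (f i = f (i + 1))) (PySem.List.pyRange 0 (size - 1) 1)
        = (PySem.List.pyRange 0 (size - 1) 1).length := by omega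
    have hall := List.countP_eq_length.mp hcount
    have hchain : ∀ j : Int, 0 ≤ j → j < ((size - 1).toNat : Int) → f j = f (j + 1) := by
      intro j hj0 hj1
      have := hall j (PySem.List.mem_pyRange_one.mpr ⟨hj0, by omega⟩)
      simpa using this
    exact (pvChain_iff f (size - 1).toNat).mp hchain i hmem.1 (by simp at hmem ⊢; omega)
  · intro hall
    have hchain : ∀ i : Int, 0 ≤ i → i < (((size - 1).toNat : Nat) : Int) + 1 → f i = f 0 := by
      intro i hi0 hi1
      exact hall i (PySem.List.mem_pyRange_one.mpr ⟨hi0, by omega⟩)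
    have hadj := (pvChain_iff f (size - 1).toNat).mpr hchain
    have hcount : List.countP (fun i => decide (f i = f (i + 1))) (PySem.List.pyRange 0 (size - 1) 1)
        = (PySem.List.pyRange 0 (size - 1) 1).length := by
      apply List.countP_eq_length.mpr
      intro i hi
      have hmem := PySem.List.mem_pyRange_one.mp hi
      simpa using hadj i hmem.1 (by omega)
    omega

-- folding Set.add can only grow the accumulated set
lemma pvFoldAdd_len (xs : List Int) (s : List Int) :
    s.length ≤ (xs.foldl PySem.Set.add s).length := by
  induction xs generalizing s with
  | nil => simp
  | cons y ys ih =>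
    have h1 : s.length ≤ (PySem.Set.add s y).length := by
      simp only [PySem.Set.add]; split
      · exact le_refl _
      · simp
    exact le_trans h1 (ih (PySem.Set.add s y))

-- folding Set.add over a nonempty accumulator keeps its first element first
lemma pvFoldAdd_head (xs : List Int) (s : List Int) (d : Int) (h : s ≠ []) :
    (xs.foldl PySem.Set.add s).headD d = s.headD d := by
  induction xs generalizing s with
  | nil => rfl
  | cons y ys ih =>
    have hne : PySem.Set.add s y ≠ [] := by
      simp only [PySem.Set.add]; split
      · exact h
      · simp
    have hh : (PySem.Set.add s y).headD d = s.headD d := by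
      simp only [PySem.Set.add]; split
      · rfl
      · cases s with
        | nil => exact absurd rfl h
        | cons a as => rfl
    rw [List.foldl_cons, ih (PySem.Set.add s y) hne, hh]

-- the set built from seed {x} stays a singleton iff everything added equals x
lemma pvFoldAdd_singleton (xs : List Int) (x : Int) :
    ((xs.foldl PySem.Set.add [x]).length = 1) ↔ ∀ y ∈ xs, y = x := by
  induction xs with
  | nil => simp
  | cons y ys ih =>
    by_cases hy : y = x
    · subst hy
      have hx : PySem.Set.add [y] y = [y] := by simp [PySem.Set.add, List.contains_eq_mem]
      rw [List.foldl_cons, hx, ih]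
      simp
    · have hadd : PySem.Set.add [x] y = [x, y] := by
        simp [PySem.Set.add, List.contains_eq_mem, hy]
      rw [List.foldl_cons, hadd]
      constructor
      · intro hlen
        exfalso
        have h2 := pvFoldAdd_len ys [x, y]
        simp only [List.length_cons, List.length_nil] at h2
        omega
      · intro hall
        exact absurd (hall y (by simp)) hy

-- Python's set(x :: xs) is xs folded into the seed singleton {x}
lemma pvOfList_cons (x : Int) (xs : List Int) :
    PySem.Set.ofList (x :: xs) = xs.foldl PySem.Set.add [x] := by
  rw [PySem.Set.ofList_eq_foldl, List.foldl_cons,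
    show PySem.Set.add [] x = [x] by simp [PySem.Set.add]]

-- ===== VERDICT (by name: the statement is the Claim_ definition above) =====
theorem diagonal_match_spec : Claim_equal_diagonal_match := by
  intro game size _ hpre
  unfold Spec_diagonal_match diagonal_match diagonal_match_alt
  rcases hpre with ⟨hs, -, -⟩ | ⟨hs, -, -⟩
  · -- size ≥ 1 : both sides test "nonzero corner and uniform diagonal"
    have hcons : PySem.List.pyRange 0 size 1 = 0 :: PySem.List.pyRange 1 size 1 :=
      PySem.List.pyRange_one_cons (by omega)
    have hmap : ∀ f : Int → Int,
        (PySem.List.pyRange 0 size 1).map f = f 0 :: (PySem.List.pyRange 1 size 1).map f := by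
      intro f; rw [hcons, List.map_cons]
    have hhead : ∀ f : Int → Int,
        (PySem.Set.ofList ((PySem.List.pyRange 0 size 1).map f)).headD 0 = f 0 := by
      intro f
      rw [hmap f, pvOfList_cons]
      exact pvFoldAdd_head _ _ _ (by simp)
    have hlen : ∀ f : Int → Int,
        ((PySem.Set.ofList ((PySem.List.pyRange 0 size 1).map f)).length = 1 ↔
          ∀ i ∈ PySem.List.pyRange 0 size 1, f i = f 0) := by
      intro f
      rw [hmap f, pvOfList_cons, pvFoldAdd_singleton]
      constructor
      · intro h i hi
        rcases PySem.List.mem_pyRange_one.mp hi with ⟨h0, h1⟩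
        by_cases hz : i = 0
        · rw [hz]
        · exact h (f i) (List.mem_map_of_mem (PySem.List.mem_pyRange_one.mpr ⟨by omega, h1⟩))
      · intro h y hy
        rcases List.mem_map.mp hy with ⟨i, hi, rfl⟩
        rcases PySem.List.mem_pyRange_one.mp hi with ⟨h0, h1⟩
        exact h i (PySem.List.mem_pyRange_one.mpr ⟨by omega, h1⟩)
    have h1 := pvBranch_iff (fun i => pvCell game i i) size hs
    have h2 := pvBranch_iff (fun i => pvCell game i (size - 1 - i)) size hs
    have hh1 := hhead (fun i => pvCell game i i)
    have hh2 := hhead (fun i => pvCell game i (size - 1 - i))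
    have hl1 := hlen (fun i => pvCell game i i)
    have hl2 := hlen (fun i => pvCell game i (size - 1 - i))
    simp only at h1 h2 hh1 hh2 hl1 hl2
    simp only [sub_zero,
      show ∀ i : Int, size - 1 - (i + 1) = size - 2 - i from fun i => by ring] at h2 hh2 hl2
    dsimp only
    rw [hh1, hh2]
    by_cases c1 : (PySem.Set.ofList ((PySem.List.pyRange 0 size 1).map (fun i => pvCell game i i))).length = 1 ∧
        pvCell game 0 0 ≠ 0
    · rw [if_pos ⟨c1.2, h1.mpr (hl1.mp c1.1)⟩, if_pos c1]
    · rw [if_neg (fun h => c1 ⟨hl1.mpr (h1.mp h.2), h.1⟩), if_neg c1]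
      by_cases c2 : (PySem.Set.ofList ((PySem.List.pyRange 0 size 1).map (fun i => pvCell game i (size - 1 - i)))).length = 1 ∧
          pvCell game 0 (size - 1) ≠ 0
      · rw [if_pos ⟨c2.2, h2.mpr (hl2.mp c2.1)⟩, if_pos c2]
      · rw [if_neg (fun h => c2 ⟨hl2.mpr (h2.mp h.2), h.1⟩), if_neg c2]
  · -- size ≤ 0 : empty ranges on both sides, both programs return 0
    have he1 : PySem.List.pyRange 0 (size - 1) 1 = [] := PySem.List.pyRange_one_eq_nil (by omega)
    have he2 : PySem.List.pyRange 0 size 1 = [] := PySem.List.pyRange_one_eq_nil (by omega)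
    rw [he1, he2]
    simp only [List.foldl_nil, List.map_nil]
    rw [if_neg (by intro h; omega), if_neg (by intro h; omega)]
    rw [if_neg (by intro h; simp [PySem.Set.ofList_eq_foldl] at h),
        if_neg (by intro h; simp [PySem.Set.ofList_eq_foldl] at h)]
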